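-- pv_equiv track=rewrite | github.com/neshdev/competitive-prog | edu_122/A.py | least
-- ===== SOURCE A (Python) =====
-- def least(ans, x):
--     if x < ans:
--         ans, x = x, ans
--     diff = 0
--     while x:
--         ans, r1 = divmod(ans, 10)
--         x, r2 = divmod(x, 10)
--         if r1 != r2:
--             diff += 1
--
--     while ans:
--         ans, r1 = divmod(ans, 10)
--         diff += 1
--
--     return diff
-- ===== SOURCE B (Python) =====
-- def least(ans, x):
--     a = str(ans)
--     b = str(x)
--     width = max(len(a), len(b))
--     diff = 0
--     for c, d in zip(a.zfill(width), b.zfill(width)):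
--         if c != d:
--             diff += 1
--     return diff
-- ===== Notes on version B (the rewrite author's own statement) =====
-- stated objective: idiomatic
-- what changed: Replaces the swap plus two divmod while-loops with a single pass comparing the zero-padded decimal string representations character by character.
import Mathlib
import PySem

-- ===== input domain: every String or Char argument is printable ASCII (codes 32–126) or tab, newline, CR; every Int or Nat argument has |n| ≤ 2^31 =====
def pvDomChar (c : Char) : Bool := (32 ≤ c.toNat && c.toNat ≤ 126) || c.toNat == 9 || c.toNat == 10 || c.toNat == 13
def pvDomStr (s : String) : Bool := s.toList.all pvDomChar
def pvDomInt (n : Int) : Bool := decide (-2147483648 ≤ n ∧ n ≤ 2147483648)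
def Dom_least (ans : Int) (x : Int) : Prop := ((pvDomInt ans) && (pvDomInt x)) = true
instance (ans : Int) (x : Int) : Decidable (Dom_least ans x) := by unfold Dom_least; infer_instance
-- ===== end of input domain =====

-- B replaces A's swap plus two divmod while-loops by one character-wise comparison of the
-- zero-padded decimal string representations (same cost, more idiomatic).

-- ===== PORT A =====
-- first `while x:` loop; the dite guard `0 < x` is a totality guard only: it agrees with
-- Python's `x != 0` on the nonnegative inputs Pre_least admits (Python loops forever on negatives)
def leastLoop1 (ans x diff : Int) : Int × Int :=
  if h : 0 < x then
    let q1 := PySem.Int.floordiv ans 10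
    let r1 := PySem.Int.mod ans 10
    let q2 := PySem.Int.floordiv x 10
    let r2 := PySem.Int.mod x 10
    leastLoop1 q1 q2 (if r1 ≠ r2 then diff + 1 else diff)
  else (ans, diff)
termination_by x.toNat
decreasing_by
  have h10 : PySem.Int.floordiv x 10 = ((x.toNat / 10 : Nat) : Int) := by
    have hx : x = ((x.toNat : Nat) : Int) := by omega
    rw [hx]
    exact_mod_cast PySem.Int.floordiv_natCast x.toNat 10
  rw [h10]
  have hlt : x.toNat / 10 < x.toNat := Nat.div_lt_self (by omega) (by norm_num)
  omega

-- second `while ans:` loop (same totality guard; r1 is computed and unused in Python)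
def leastLoop2 (ans diff : Int) : Int :=
  if h : 0 < ans then leastLoop2 (PySem.Int.floordiv ans 10) (diff + 1) else diff
termination_by ans.toNat
decreasing_by
  have h10 : PySem.Int.floordiv ans 10 = ((ans.toNat / 10 : Nat) : Int) := by
    have hx : ans = ((ans.toNat : Nat) : Int) := by omega
    rw [hx]
    exact_mod_cast PySem.Int.floordiv_natCast ans.toNat 10
  rw [h10]
  have hlt : ans.toNat / 10 < ans.toNat := Nat.div_lt_self (by omega) (by norm_num)
  omega

def least (ans : Int) (x : Int) : Int :=
  let p := if x < ans then (x, ans) else (ans, x)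
  let q := leastLoop1 p.1 p.2 0
  leastLoop2 q.1 q.2

-- ===== PORT B =====
def least_alt (ans : Int) (x : Int) : Int :=
  let a := PySem.Int.toChars ans
  let b := PySem.Int.toChars x
  let width : Int := max (PySem.Chars.len a) (PySem.Chars.len b)
  ((PySem.Chars.zfill a width).zip (PySem.Chars.zfill b width)).foldl
    (fun diff cd => if cd.1 ≠ cd.2 then diff + 1 else diff) 0

-- ===== PRECONDITION & SPEC =====
-- Pre_ excludes negative arguments: there Python's A never returns (divmod keeps a negative
-- value negative, so `while x:` / `while ans:` loops forever)
def Pre_least (ans : Int) (x : Int) : Prop := 0 ≤ ans ∧ 0 ≤ x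
instance (ans : Int) (x : Int) : Decidable (Pre_least ans x) := by unfold Pre_least; infer_instance
def pvWitness_least : Int × Int := (3, 13)

def Spec_least (ans : Int) (x : Int) (out : Int) : Prop := out = least_alt ans x
instance (ans : Int) (x : Int) (out : Int) : Decidable (Spec_least ans x out) := by unfold Spec_least; infer_instance

-- ===== CLAIM (what is proved, stated in full; the proofs are below) =====
def Claim_equal_least : Prop := ∀ (ans : Int) (x : Int), Dom_least ans x → Pre_least ans x → Spec_least ans x (least ans x)

-- ===== LEMMAS AND PROOFS =====

-- the i-th (little-endian) decimal digit of m
def dig (m i : Nat) : Nat := m / 10 ^ i % 10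

-- common specification: number of decimal digit positions where m and n differ
def diffCount (m n : Nat) : Nat :=
  if m = 0 ∧ n = 0 then 0
  else (if m % 10 = n % 10 then 0 else 1) + diffCount (m / 10) (n / 10)
termination_by m + n
decreasing_by
  rcases Nat.eq_zero_or_pos m with hm | hm
  · rcases Nat.eq_zero_or_pos n with hn | hn
    · simp_all
    · have := Nat.div_lt_self hn (by norm_num : 1 < 10)
      have := Nat.div_le_self m 10
      omega
  · have := Nat.div_lt_self hm (by norm_num : 1 < 10)
    have := Nat.div_le_self n 10
    omega

lemma dig_zero (m : Nat) : dig m 0 = m % 10 := by simp [dig]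

lemma dig_succ (m i : Nat) : dig m (i + 1) = dig (m / 10) i := by
  simp [dig, Nat.div_div_eq_div_mul, pow_succ, Nat.mul_comm]

-- ---- A side ----

lemma loop2_zero (d : Int) : leastLoop2 0 d = d := by
  rw [leastLoop2.eq_def]; simp

lemma loop1_eq (n : Nat) : ∀ (m : Nat) (d : Int), m ≤ n →
    leastLoop1 (m : Int) (n : Int) d = (0, d + diffCount m n) := by
  induction n using Nat.strong_induction_on with
  | _ n ih =>
    intro m d hmn
    rcases Nat.eq_zero_or_pos n with hn | hn
    · subst hn
      have hm : m = 0 := by omega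
      subst hm
      rw [leastLoop1.eq_def, diffCount]
      simp
    · have hpos : (0 : Int) < (n : Int) := by exact_mod_cast hn
      rw [leastLoop1.eq_def, dif_pos hpos]
      have hfd1 : PySem.Int.floordiv ((m : Nat) : Int) 10 = ((m / 10 : Nat) : Int) := by
        exact_mod_cast PySem.Int.floordiv_natCast m 10
      have hfd2 : PySem.Int.floordiv ((n : Nat) : Int) 10 = ((n / 10 : Nat) : Int) := by
        exact_mod_cast PySem.Int.floordiv_natCast n 10
      have hmd1 : PySem.Int.mod ((m : Nat) : Int) 10 = ((m % 10 : Nat) : Int) := by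
        exact_mod_cast PySem.Int.mod_natCast m 10
      have hmd2 : PySem.Int.mod ((n : Nat) : Int) 10 = ((n % 10 : Nat) : Int) := by
        exact_mod_cast PySem.Int.mod_natCast n 10
      simp only [hfd1, hfd2, hmd1, hmd2]
      have hif : (if (((m % 10 : Nat) : Int)) ≠ (((n % 10 : Nat) : Int)) then d + 1 else d)
          = d + ((if m % 10 = n % 10 then 0 else 1 : Nat) : Int) := by
        by_cases h : m % 10 = n % 10
        · simp [h]
        · simp [h]
          omega
      rw [hif, ih (n / 10) (Nat.div_lt_self hn (by norm_num)) (m / 10)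
            (d + ((if m % 10 = n % 10 then 0 else 1 : Nat) : Int)) (Nat.div_le_div_right hmn)]
      have hdc : diffCount m n = (if m % 10 = n % 10 then 0 else 1) + diffCount (m / 10) (n / 10) := by
        conv_lhs => rw [diffCount]
        rw [if_neg (by omega)]
      rw [hdc, Prod.ext_iff]
      refine ⟨rfl, by push_cast; ring⟩

lemma diffCount_comm (m n : Nat) : diffCount m n = diffCount n m := by
  have key : ∀ s, ∀ m n : Nat, m + n ≤ s → diffCount m n = diffCount n m := by
    intro s
    induction s with
    | zero =>
      intro m n h
      have h1 : m = 0 := by omega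
      have h2 : n = 0 := by omega
      subst h1; subst h2; rfl
    | succ s ih =>
      intro m n h
      by_cases h0 : m = 0 ∧ n = 0
      · obtain ⟨h1, h2⟩ := h0; subst h1; subst h2; rfl
      · conv_lhs => rw [diffCount]
        rw [if_neg h0]
        conv_rhs => rw [diffCount]
        rw [if_neg (show ¬ (n = 0 ∧ m = 0) by omega)]
        have hlt : m / 10 + n / 10 ≤ s := by
          have hm' := Nat.div_le_self m 10
          have hn' := Nat.div_le_self n 10
          have h1 : 0 < m ∨ 0 < n := by omega
          rcases h1 with h1 | h1
          · have := Nat.div_lt_self h1 (by norm_num : 1 < 10); omega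
          · have := Nat.div_lt_self h1 (by norm_num : 1 < 10); omega
        rw [ih (m / 10) (n / 10) hlt]
        congr 1
        by_cases hd : m % 10 = n % 10
        · rw [if_pos hd, if_pos hd.symm]
        · rw [if_neg hd, if_neg (fun hh => hd hh.symm)]
  exact key (m + n) m n le_rfl

lemma least_eq_diffCount (m n : Nat) : least (m : Int) (n : Int) = diffCount m n := by
  unfold least
  by_cases hlt : (n : Int) < (m : Int)
  · have hnm : n ≤ m := by exact_mod_cast hlt.le
    simp only [if_pos hlt]
    rw [loop1_eq m n 0 hnm]
    simp [loop2_zero, diffCount_comm n m]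
  · have hmn : m ≤ n := by exact_mod_cast not_lt.mp hlt
    simp only [if_neg hlt]
    rw [loop1_eq n m 0 hmn]
    simp [loop2_zero]

-- ---- B side ----

lemma coreAppend (f : Nat) : ∀ n acc, Nat.toDigitsCore 10 f n acc = Nat.toDigitsCore 10 f n [] ++ acc := by
  induction f with
  | zero => intro n acc; simp [Nat.toDigitsCore]
  | succ f ih =>
    intro n acc
    simp only [Nat.toDigitsCore]
    by_cases h : n / 10 = 0
    · simp [h]
    · rw [if_neg h, if_neg h, ih (n / 10) ((n % 10).digitChar :: acc), ih (n / 10) [(n % 10).digitChar]]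
      simp

lemma coreFuel (f : Nat) : ∀ g n, n < f → n < g →
    Nat.toDigitsCore 10 f n [] = Nat.toDigitsCore 10 g n [] := by
  induction f with
  | zero => intro g n h; omega
  | succ f ih =>
    intro g n h1 h2
    cases g with
    | zero => omega
    | succ g =>
      simp only [Nat.toDigitsCore]
      by_cases h : n / 10 = 0
      · simp [h]
      · rw [if_neg h, if_neg h]
        have hn0 : 0 < n := by
          rcases Nat.eq_zero_or_pos n with h' | h'
          · exfalso; apply h; simp [h']
          · exact h'
        have hd : n / 10 < n := Nat.div_lt_self hn0 (by norm_num)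
        rw [coreAppend f (n / 10) [(n % 10).digitChar], coreAppend g (n / 10) [(n % 10).digitChar],
            ih g (n / 10) (by omega) (by omega)]

lemma toDigits_small (m : Nat) (h : m < 10) : Nat.toDigits 10 m = [Nat.digitChar m] := by
  unfold Nat.toDigits
  simp only [Nat.toDigitsCore]
  rw [if_pos (Nat.div_eq_of_lt h), Nat.mod_eq_of_lt h]

lemma toDigits_ten (m : Nat) (h : 10 ≤ m) :
    Nat.toDigits 10 m = Nat.toDigits 10 (m / 10) ++ [Nat.digitChar (m % 10)] := by
  have h0 : m / 10 ≠ 0 := by omega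
  unfold Nat.toDigits
  conv_lhs => simp only [Nat.toDigitsCore]
  rw [if_neg h0, coreAppend m (m / 10) [(m % 10).digitChar],
      coreFuel m (m / 10 + 1) (m / 10) (by have := Nat.div_lt_self (by omega : 0 < m) (by norm_num : 1 < 10); omega) (by omega)]

lemma digitChar_nosign : ∀ d : Nat, d < 10 → Nat.digitChar d ≠ '+' ∧ Nat.digitChar d ≠ '-' := by decide

lemma digitChar_inj : ∀ d : Nat, d < 10 → ∀ e : Nat, e < 10 → (Nat.digitChar d = Nat.digitChar e ↔ d = e) := by decide

lemma digits_rep (m : Nat) :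
    Nat.toDigits 10 m
      = ((List.range (Nat.toDigits 10 m).length).map (fun i => Nat.digitChar (dig m i))).reverse
    ∧ m < 10 ^ (Nat.toDigits 10 m).length ∧ 1 ≤ (Nat.toDigits 10 m).length := by
  induction m using Nat.strong_induction_on with
  | _ m ih =>
    by_cases h : m < 10
    · rw [toDigits_small m h]
      refine ⟨?_, by simpa using h, by simp⟩
      simp [dig, Nat.mod_eq_of_lt h]
    · rw [not_lt] at h
      obtain ⟨e1, e2, e3⟩ := ih (m / 10) (Nat.div_lt_self (by omega) (by norm_num))
      rw [toDigits_ten m h]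
      simp only [List.length_append, List.length_cons, List.length_nil, Nat.zero_add]
      refine ⟨?_, ?_, by omega⟩
      · rw [List.range_succ_eq_map, List.map_cons, List.reverse_cons, List.map_map]
        congr 1
        · have hfun : ((fun i => Nat.digitChar (dig m i)) ∘ Nat.succ)
              = fun i => Nat.digitChar (dig (m / 10) i) := by
            funext i
            simp [Function.comp, Nat.succ_eq_add_one, dig_succ]
          rw [hfun]
          exact e1
        · simp [dig_zero]
      · have hx : m < 10 ^ (Nat.toDigits 10 (m / 10)).length * 10 :=
          (Nat.div_lt_iff_lt_mul (by norm_num)).mp e2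
        calc m < 10 ^ (Nat.toDigits 10 (m / 10)).length * 10 := hx
          _ = 10 ^ ((Nat.toDigits 10 (m / 10)).length + 1) := (pow_succ 10 _).symm

lemma zfill_full (cs : List Char) (w : Int) (h : w ≤ (cs.length : Int)) :
    PySem.Chars.zfill cs w = cs := by
  rw [PySem.Chars.zfill.eq_def, if_pos h]

lemma zfill_cons_digit (c : Char) (rest : List Char) (w : Int)
    (h1 : ¬ (w ≤ (((c :: rest).length : Nat) : Int))) (h2 : ¬ (c = '+' ∨ c = '-')) :
    PySem.Chars.zfill (c :: rest) w = List.replicate (w.toNat - (c :: rest).length) '0' ++ (c :: rest) := by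
  rw [PySem.Chars.zfill.eq_def, if_neg h1]
  simp [h2]

lemma zfill_eq (m L : Nat) (hL : (Nat.toDigits 10 m).length ≤ L) :
    PySem.Chars.zfill (Nat.toDigits 10 m) (L : Int)
      = ((List.range L).map (fun i => Nat.digitChar (dig m i))).reverse := by
  obtain ⟨e1, e2, e3⟩ := digits_rep m
  rcases Nat.eq_or_lt_of_le hL with hk | hk
  · rw [zfill_full _ _ (by exact_mod_cast hk.ge), ← hk]
    exact e1
  · have hne : Nat.toDigits 10 m ≠ [] := by
      intro hnil; rw [hnil] at e3; simp at e3
    obtain ⟨c, rest, hs⟩ := List.exists_cons_of_ne_nil hne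
    have hc : c ∈ Nat.toDigits 10 m := by rw [hs]; exact List.mem_cons_self
    rw [e1, List.mem_reverse] at hc
    obtain ⟨i, _, hci⟩ := List.mem_map.mp hc
    have hdlt : dig m i < 10 := Nat.mod_lt _ (by norm_num)
    have hcns := digitChar_nosign (dig m i) hdlt
    rw [hs, zfill_cons_digit c rest (L : Int)
          (by rw [← hs]; omega)
          (by rw [hci] at hcns; tauto), ← hs, Int.toNat_natCast]
    have hzeros : ∀ j, (Nat.toDigits 10 m).length ≤ j → Nat.digitChar (dig m j) = '0' := by
      intro j hj
      have hj10 : m < 10 ^ j :=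
        lt_of_lt_of_le e2 (Nat.pow_le_pow_right (by norm_num) hj)
      have hd0 : dig m j = 0 := by simp [dig, Nat.div_eq_of_lt hj10]
      rw [hd0]
      decide
    have hsplit : L = (Nat.toDigits 10 m).length + (L - (Nat.toDigits 10 m).length) := by omega
    conv_rhs => rw [hsplit]
    rw [List.range_add, List.map_append, List.reverse_append, List.map_map]
    have hrep : List.map ((fun i => Nat.digitChar (dig m i)) ∘ fun x => (Nat.toDigits 10 m).length + x)
        (List.range (L - (Nat.toDigits 10 m).length)) = List.replicate (L - (Nat.toDigits 10 m).length) '0' := by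
      rw [List.eq_replicate_iff]
      refine ⟨by simp, ?_⟩
      intro b hb
      obtain ⟨j, _, hbj⟩ := List.mem_map.mp hb
      rw [← hbj]
      exact hzeros _ (Nat.le_add_right _ _)
    rw [hrep, List.reverse_replicate, ← e1]

lemma diffCount_eq_count (k : Nat) : ∀ m n : Nat, m < 10 ^ k → n < 10 ^ k →
    diffCount m n = (List.range k).countP (fun i => decide (dig m i ≠ dig n i)) := by
  induction k with
  | zero =>
    intro m n hm hn
    have h1 : m = 0 := by simpa using hm
    have h2 : n = 0 := by simpa using hn
    subst h1; subst h2
    rw [diffCount]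
    simp
  | succ k ih =>
    intro m n hm hn
    conv_lhs => rw [diffCount]
    by_cases h0 : m = 0 ∧ n = 0
    · obtain ⟨h1, h2⟩ := h0; subst h1; subst h2
      rw [if_pos ⟨rfl, rfl⟩]
      simp [dig]
    · rw [if_neg h0, List.range_succ_eq_map, List.countP_cons, List.countP_map]
      have hmd : m / 10 < 10 ^ k := by
        rw [Nat.div_lt_iff_lt_mul (by norm_num)]
        calc m < 10 ^ (k + 1) := hm
          _ = 10 ^ k * 10 := pow_succ 10 k
      have hnd : n / 10 < 10 ^ k := by
        rw [Nat.div_lt_iff_lt_mul (by norm_num)]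
        calc n < 10 ^ (k + 1) := hn
          _ = 10 ^ k * 10 := pow_succ 10 k
      rw [ih (m / 10) (n / 10) hmd hnd]
      have hfun : ((fun i => decide (dig m i ≠ dig n i)) ∘ Nat.succ)
          = fun i => decide (dig (m / 10) i ≠ dig (n / 10) i) := by
        funext i
        simp [Function.comp, Nat.succ_eq_add_one, dig_succ]
      rw [hfun]
      by_cases hd : m % 10 = n % 10
      · simp [dig_zero, hd]
      · simp only [dig_zero, hd]
        simp [hd]
        omega

lemma alt_eq_diffCount (m n : Nat) : least_alt (m : Int) (n : Int) = diffCount m n := by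
  unfold least_alt
  obtain ⟨_, em2, em3⟩ := digits_rep m
  obtain ⟨_, en2, en3⟩ := digits_rep n
  have hm0 : ¬ ((m : Int) < 0) := by omega
  have hn0 : ¬ ((n : Int) < 0) := by omega
  simp only [PySem.Int.toChars, if_neg hm0, if_neg hn0, Int.toNat_natCast, PySem.Chars.len]
  set km := (Nat.toDigits 10 m).length with hkm
  set kn := (Nat.toDigits 10 n).length with hkn
  set L := max km kn with hLdef
  have hcast : max ((km : Int)) ((kn : Int)) = ((L : Int)) := by
    rw [hLdef]; exact_mod_cast (Nat.cast_max km kn).symm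
  rw [hcast, zfill_eq m L (le_max_left _ _), zfill_eq n L (le_max_right _ _),
      ← List.map_reverse, ← List.map_reverse, List.zip_map']
  have hfun : (fun (diff : Int) (cd : Char × Char) => if cd.1 ≠ cd.2 then diff + 1 else diff)
      = fun diff cd => if (fun cd : Char × Char => cd.1 != cd.2) cd = true then diff + 1 else diff := by
    funext diff cd
    by_cases h : cd.1 = cd.2 <;> simp [h]
  rw [hfun, PySem.List.foldl_count_if, List.countP_map, List.countP_reverse]
  have hmL : m < 10 ^ L := lt_of_lt_of_le em2 (Nat.pow_le_pow_right (by norm_num) (le_max_left _ _))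
  have hnL : n < 10 ^ L := lt_of_lt_of_le en2 (Nat.pow_le_pow_right (by norm_num) (le_max_right _ _))
  have hcount : (List.range L).countP
        ((fun cd : Char × Char => cd.1 != cd.2) ∘ fun i => (Nat.digitChar (dig m i), Nat.digitChar (dig n i)))
      = (List.range L).countP (fun i => decide (dig m i ≠ dig n i)) := by
    apply List.countP_congr
    intro i _
    have h1 : dig m i < 10 := Nat.mod_lt _ (by norm_num)
    have h2 : dig n i < 10 := Nat.mod_lt _ (by norm_num)
    by_cases hd : dig m i = dig n i
    · simp [Function.comp, hd]
    · have hne : Nat.digitChar (dig m i) ≠ Nat.digitChar (dig n i) :=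
        fun hh => hd ((digitChar_inj _ h1 _ h2).mp hh)
      simp [Function.comp, hd, hne]
  rw [hcount, ← diffCount_eq_count L m n hmL hnL]
  simp

-- ===== VERDICT (by name: the statement is the Claim_ definition above) =====
theorem least_spec : Claim_equal_least := by
  intro ans x _ hpre
  obtain ⟨ha, hx⟩ := hpre
  have h1 : ans = ((ans.toNat : Nat) : Int) := by omega
  have h2 : x = ((x.toNat : Nat) : Int) := by omega
  unfold Spec_least
  rw [h1, h2, least_eq_diffCount, alt_eq_diffCount]
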